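-- pv_equiv track=rewrite | github.com/johntelforduk/advent-of-code-2019 | 04-secure-container/fact_checks.py | just_two_adjacent_digits_same
-- ===== SOURCE A (Python) =====
-- def just_two_adjacent_digits_same(number: int) -> bool:
--     """Two adjacent matching digits are not part of a larger group of matching digits."""
--     digits = str(number)
--     num_length = len(digits)
--
--     for pair in range(num_length - 1):          # For example, a 6 digit number has 5 pairs to check.
--
--         d1 = digits[pair]                       # First digit of the pair.
--         d2 = digits[pair + 1]                   # Second digit of the pair.
--
--         if pair != 0:
--             d0 = digits[pair - 1]               # Digit to the left of the first digit.
--         else: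
--             d0 = None                           # There is no digit to the left of the first digit.
--
--         if pair != num_length - 2:
--             d3 = digits[pair + 2]               # Digit to the right of the second digit.
--         else:
--             d3 = None                           # There is no digit to the right of the last digit.
--
--         if d1 == d2 and d0 != d1 and d2 != d3:
--             return True
--     return False
-- ===== SOURCE B (Python) =====
-- from itertools import groupby
--
--
-- def just_two_adjacent_digits_same(number: int) -> bool:
--     """Two adjacent matching digits are not part of a larger group of matching digits."""
--     return any(sum(1 for _ in group) == 2 for _, group in groupby(str(number)))
-- ===== Notes on version B (the rewrite author's own statement) =====
-- stated objective: idiomatic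
-- what changed: Replaces the index-based pair scan with left/right neighbour lookups by an itertools.groupby run-length decomposition: B groups equal adjacent characters of str(number) and returns True iff some group has length exactly 2.
import Mathlib
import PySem

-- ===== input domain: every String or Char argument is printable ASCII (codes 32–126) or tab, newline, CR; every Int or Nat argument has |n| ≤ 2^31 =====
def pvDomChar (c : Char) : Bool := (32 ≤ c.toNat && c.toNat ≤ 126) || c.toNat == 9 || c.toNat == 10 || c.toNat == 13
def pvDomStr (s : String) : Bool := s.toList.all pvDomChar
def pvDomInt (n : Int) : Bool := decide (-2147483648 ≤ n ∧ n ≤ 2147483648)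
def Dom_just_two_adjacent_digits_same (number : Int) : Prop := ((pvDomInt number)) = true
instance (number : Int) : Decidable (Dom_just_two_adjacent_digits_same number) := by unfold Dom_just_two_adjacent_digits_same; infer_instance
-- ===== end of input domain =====

-- B replaces A's index-based pair scan (with left/right neighbour lookups) by a groupby
-- run-length decomposition: some run of equal adjacent characters has length exactly 2 (idiomatic).

-- ===== PORT A =====
-- Loop body of A at index `pair`; the indices pair, pair+1 (and pair-1, pair+2 when taken)
-- are always in range in A, so the `none` match arms are unreachable.
def condA (s : List Char) (numLength pair : Int) : Bool :=
  match PySem.List.pyGet? s pair, PySem.List.pyGet? s (pair + 1) with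
  | some d1, some d2 =>
      let d0 : Option Char := if pair != 0 then PySem.List.pyGet? s (pair - 1) else none
      let d3 : Option Char := if pair != numLength - 2 then PySem.List.pyGet? s (pair + 2) else none
      d1 == d2 && d0 != some d1 && some d2 != d3
  | _, _ => false

-- `for pair in range(num_length - 1): if …: return True` / `return False`
def loopA (s : List Char) (numLength : Int) : List Int → Bool
  | [] => false
  | p :: rest => if condA s numLength p then true else loopA s numLength rest

def just_two_adjacent_digits_same (number : Int) : Bool :=
  let digits := PySem.Int.toChars number
  let numLength : Int := digits.length
  loopA digits numLength (PySem.List.pyRange 0 (numLength - 1) 1)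

-- ===== PORT B =====
-- itertools.groupby: run lengths of maximal blocks of equal adjacent characters.
def rlGo (c : Char) (k : Nat) : List Char → List Nat
  | [] => [k]
  | d :: rest => if d == c then rlGo c (k + 1) rest else k :: rlGo d 1 rest

def runLengths : List Char → List Nat
  | [] => []
  | c :: rest => rlGo c 1 rest

def just_two_adjacent_digits_same_alt (number : Int) : Bool :=
  (runLengths (PySem.Int.toChars number)).any (· == 2)

-- ===== PRECONDITION & SPEC =====
def Spec_just_two_adjacent_digits_same (number : Int) (out : Bool) : Prop := out = just_two_adjacent_digits_same_alt number
instance (number : Int) (out : Bool) : Decidable (Spec_just_two_adjacent_digits_same number out) := by unfold Spec_just_two_adjacent_digits_same; infer_instance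

-- ===== CLAIM (what is proved, stated in full; the proofs are below) =====
def Claim_equal_just_two_adjacent_digits_same : Prop := ∀ (number : Int), Dom_just_two_adjacent_digits_same number → Spec_just_two_adjacent_digits_same number (just_two_adjacent_digits_same number)

-- ===== LEMMAS AND PROOFS =====

-- Structural reformulation of A's scan: `prev` is the character left of the window (none at the start);
-- an isolated pair is found iff the first two chars match, differ from `prev`, and from the next char.
def isoAux : Option Char → List Char → Bool
  | _, [] => false
  | _, [_] => false
  | prev, a :: b :: u =>
      if a == b && prev != some a && some b != u.head? then true else isoAux (some a) (b :: u)

lemma isoAux_self (a : Char) (rest : List Char) :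
    isoAux (some a) (a :: rest) = isoAux (some a) rest := by
  cases rest with
  | nil => simp [isoAux]
  | cons b u => simp [isoAux]

lemma isoAux_step (prev : Option Char) (d : Char) (rest : List Char) (h : prev ≠ some d) :
    isoAux prev (d :: rest)
      = (isoAux (some d) rest || decide ((rest.takeWhile (fun e => e == d)).length = 1)) := by
  cases rest with
  | nil => simp [isoAux]
  | cons b u =>
    rw [isoAux]
    by_cases hdb : d = b
    · subst hdb
      by_cases hu : u.head? = some d
      · have hc : (d == d && prev != some d && some d != u.head?) = false := by simp [hu]
        rw [hc]
        simp only [Bool.false_eq_true, if_false]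
        have hlen : ¬ ((d :: u).takeWhile (fun e => e == d)).length = 1 := by
          cases u with
          | nil => simp at hu
          | cons x v =>
            have hx : x = d := by simpa using hu
            subst hx
            simp
        rw [decide_eq_false hlen]
        simp
      · have hbne : (some d != u.head?) = true := by
          cases hh : u.head? with
          | none => simp
          | some x =>
            have : x ≠ d := fun hc => hu (by simp [hh, hc])
            simp [Ne.symm this]
        have hc : (d == d && prev != some d && some d != u.head?) = true := by
          simp [h, hbne]
        rw [hc]
        simp only [if_true]
        have hlen : ((d :: u).takeWhile (fun e => e == d)).length = 1 := by
          cases u with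
          | nil => simp
          | cons x v =>
            have hx : (x == d) = false := by
              have : x ≠ d := fun hc => hu (by simp [hc])
              simp [this]
            simp [hx]
        rw [decide_eq_true hlen]
        simp
    · have hc : (d == b && prev != some d && some b != u.head?) = false := by
        have : (d == b) = false := by simp [hdb]
        simp [this]
      rw [hc]
      simp only [Bool.false_eq_true, if_false]
      have hlen : ((b :: u).takeWhile (fun e => e == d)).length = 0 := by
        have : (b == d) = false := by simp [Ne.symm hdb]
        simp [this]
      simp [hlen]

lemma rlGo_any (s : List Char) : ∀ (c : Char) (k : Nat),
    (rlGo c k s).any (· == 2)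
      = (isoAux (some c) s || decide (k + (s.takeWhile (fun e => e == c)).length = 2)) := by
  induction s with
  | nil => intro c k; by_cases hk : k = 2 <;> simp [rlGo, isoAux, hk]
  | cons d rest ih =>
    intro c k
    by_cases hdc : d = c
    · subst hdc
      rw [rlGo]
      simp only [BEq.rfl, if_true]
      rw [ih d (k + 1), isoAux_self]
      have : ((d :: rest).takeWhile (fun e => e == d)).length
            = (rest.takeWhile (fun e => e == d)).length + 1 := by
        simp [List.takeWhile]
      rw [this]
      congr 1
      by_cases h2 : k + 1 + (rest.takeWhile (fun e => e == d)).length = 2 <;>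
        [skip; skip] <;> simp [h2] <;> omega
    · rw [rlGo]
      have hbd : (d == c) = false := by simp [hdc]
      rw [hbd]
      simp only [Bool.false_eq_true, if_false, List.any_cons]
      rw [ih d 1, isoAux_step (some c) d rest (by simp [Ne.symm hdc])]
      have : ((d :: rest).takeWhile (fun e => e == c)).length = 0 := by
        simp [List.takeWhile, hbd]
      rw [this]
      have h1 : (1 + (rest.takeWhile (fun e => e == d)).length = 2)
              ↔ ((rest.takeWhile (fun e => e == d)).length = 1) := by omega
      have hk : ((k : Nat) == 2) = decide (k + 0 = 2) := by
        by_cases h2 : k = 2 <;> simp [h2]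
      rw [hk]
      simp only [decide_eq_decide.mpr h1]
      cases hA : isoAux (some d) rest <;>
      cases hB : decide ((rest.takeWhile (fun e => e == d)).length = 1) <;>
      cases hC : decide (k + 0 = 2) <;> simp

lemma runLengths_any (s : List Char) : (runLengths s).any (· == 2) = isoAux none s := by
  cases s with
  | nil => simp [runLengths, isoAux]
  | cons c rest =>
    rw [runLengths, rlGo_any rest c 1, isoAux_step none c rest (by simp)]
    congr 1
    have : (1 + (rest.takeWhile (fun e => e == c)).length = 2)
         ↔ ((rest.takeWhile (fun e => e == c)).length = 1) := by omega
    exact decide_eq_decide.mpr this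

lemma loop_iso : ∀ (t pre : List Char),
    loopA (pre ++ t) ((pre ++ t).length : Int)
      (PySem.List.pyRange (pre.length : Int) (((pre ++ t).length : Int) - 1) 1)
      = isoAux pre.getLast? t := by
  intro t
  induction t with
  | nil =>
    intro pre
    rw [PySem.List.pyRange_one_eq_nil (by simp)]
    simp [loopA, isoAux]
  | cons a t' ih =>
    intro pre
    cases t' with
    | nil =>
      rw [PySem.List.pyRange_one_eq_nil (by simp)]
      simp [loopA, isoAux]
    | cons b u =>
      have hlt : (pre.length : Int) < ((pre ++ a :: b :: u).length : Int) - 1 := by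
        simp; omega
      rw [PySem.List.pyRange_one_cons hlt, loopA]
      have hcond : condA (pre ++ a :: b :: u) ((pre ++ a :: b :: u).length : Int) (pre.length : Int)
          = (a == b && pre.getLast? != some a && some b != u.head?) := by
        rw [condA]
        rw [PySem.List.pyGet?_append_length]
        rw [show ((pre.length : Int) + 1) = ((pre.length : Int) + (1 : Nat)) by simp]
        rw [PySem.List.pyGet?_append_right]
        simp only [List.getElem?_cons_succ, List.getElem?_cons_zero]
        have hd0 : (if (pre.length : Int) != 0 then PySem.List.pyGet? (pre ++ a :: b :: u) ((pre.length : Int) - 1) else none) = pre.getLast? := by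
          by_cases hp : pre = []
          · subst hp; simp
          · have hlen : 0 < pre.length := List.length_pos_iff.mpr hp
            have hne : ((pre.length : Int) != 0) = true := by simp; omega
            rw [hne]
            simp only [if_true]
            have hcast : ((pre.length : Int) - 1) = ((pre.length - 1 : Nat) : Int) := by omega
            rw [hcast, PySem.List.pyGet?_natCast]
            rw [List.getElem?_append_left (by omega)]
            rw [List.getLast?_eq_getElem?]
        have hd3 : (if (pre.length : Int) != ((pre ++ a :: b :: u).length : Int) - 2 then PySem.List.pyGet? (pre ++ a :: b :: u) ((pre.length : Int) + 2) else none) = u.head? := by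
          cases u with
          | nil =>
            have : ((pre.length : Int) != ((pre ++ [a, b]).length : Int) - 2) = false := by
              simp
            rw [this]
            simp
          | cons x v =>
            have : ((pre.length : Int) != ((pre ++ a :: b :: x :: v).length : Int) - 2) = true := by
              simp; omega
            rw [this]
            simp only [if_true]
            rw [show ((pre.length : Int) + 2) = ((pre.length : Int) + (2 : Nat)) by simp]
            rw [PySem.List.pyGet?_append_right]
            simp
        rw [hd0, hd3]
      rw [hcond]
      by_cases hc : (a == b && pre.getLast? != some a && some b != u.head?) = true
      · rw [hc]
        simp only [if_true]
        rw [isoAux, hc]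
        simp
      · rw [Bool.not_eq_true] at hc
        rw [hc]
        simp only [Bool.false_eq_true, if_false]
        have hre : pre ++ a :: b :: u = (pre ++ [a]) ++ b :: u := by simp
        have hlen2 : ((pre.length : Int) + 1) = (((pre ++ [a]).length : Nat) : Int) := by simp
        rw [hre, hlen2, ih (pre ++ [a])]
        rw [isoAux, hc]
        simp only [Bool.false_eq_true, if_false]
        congr 1
        simp

-- ===== VERDICT (by name: the statement is the Claim_ definition above) =====
theorem just_two_adjacent_digits_same_spec : Claim_equal_just_two_adjacent_digits_same := by
  intro number _
  unfold Spec_just_two_adjacent_digits_same just_two_adjacent_digits_same just_two_adjacent_digits_same_alt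
  have h := loop_iso (PySem.Int.toChars number) []
  simp only [List.nil_append, List.length_nil, Nat.cast_zero, List.getLast?_nil] at h
  rw [h, runLengths_any]
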